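-- pv_equiv track=rewrite | github.com/kkaferly/Intro_App_Dev_350 | fuelEconomy.py | carsDict
-- ===== SOURCE A (Python) =====
-- def carsDict(mileageList):
--     cars = {}
--     for i in mileageList:
--         if cars.get(i[0],0) == 0:
--             cars[i[0]] = (1, i[1])
--         else:
--             count, mileage = cars[i[0]]
--             count += 1
--             mileage += i[1]
--             cars[i[0]] = (count, mileage)
--
--     return cars
-- ===== SOURCE B (Python) =====
-- def carsDict(mileageList):
--     groups = {}
--     for key, miles in mileageList:
--         groups.setdefault(key, []).append(miles)
--     return {k: (len(vs), sum(vs)) for k, vs in groups.items()}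
-- ===== Notes on version B (the rewrite author's own statement) =====
-- stated objective: simpler
-- what changed: Replaces A's single pass with a running (count, sum) tuple and a get()==0 presence test by a two-phase grouping: first collect each key's mileage values into lists, then reduce each list to (len, sum) in a dict comprehension.
import Mathlib
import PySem

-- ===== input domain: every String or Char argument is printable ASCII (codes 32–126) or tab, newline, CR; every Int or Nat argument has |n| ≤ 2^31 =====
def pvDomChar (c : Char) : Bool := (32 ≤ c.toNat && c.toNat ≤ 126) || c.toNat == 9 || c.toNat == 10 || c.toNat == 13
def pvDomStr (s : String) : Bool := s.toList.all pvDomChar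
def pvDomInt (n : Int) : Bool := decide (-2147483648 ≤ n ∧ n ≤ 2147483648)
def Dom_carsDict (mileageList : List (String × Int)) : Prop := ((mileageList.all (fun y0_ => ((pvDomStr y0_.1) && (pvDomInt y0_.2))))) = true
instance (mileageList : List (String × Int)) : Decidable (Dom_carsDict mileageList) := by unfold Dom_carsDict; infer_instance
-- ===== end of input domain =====

-- B replaces A's single pass with a running (count, sum) tuple by a two-phase grouping:
-- collect each key's mileage values into lists, then reduce each list to (len, sum) (objective: simpler).


-- ===== PORT A =====
-- 'cars.get(i[0],0) == 0' is true exactly when the key is absent: stored values are tuples,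
-- and a tuple never compares equal to the int 0 — ported as a match on get?.
def carsDict (mileageList : List (String × Int)) : List (String × Int × Int) :=
  (mileageList.foldl (fun cars i =>
      match cars.get? i.1 with
      | none => cars.insert i.1 (1, i.2)
      | some (count, mileage) => cars.insert i.1 (count + 1, mileage + i.2))
    PySem.Dict.empty).items

-- ===== PORT B =====
-- groups.setdefault(k, []).append(m) leaves groups with groups[k] = groups.get(k, []) + [m]: ported as Dict.modify.
def carsDict_alt (mileageList : List (String × Int)) : List (String × Int × Int) :=
  let groups : PySem.Dict String (List Int) :=
    mileageList.foldl (fun d i => d.modify i.1 [] (· ++ [i.2])) PySem.Dict.empty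
  -- the dict comprehension over groups.items
  (groups.items.foldl (fun d p => d.insert p.1 ((p.2.length : Int), p.2.sum)) PySem.Dict.empty).items

-- ===== PRECONDITION & SPEC =====
def Spec_carsDict (mileageList : List (String × Int)) (out : List (String × Int × Int)) : Prop := out = carsDict_alt mileageList
instance (mileageList : List (String × Int)) (out : List (String × Int × Int)) : Decidable (Spec_carsDict mileageList out) := by unfold Spec_carsDict; infer_instance

-- ===== CLAIM (what is proved, stated in full; the proofs are below) =====
def Claim_equal_carsDict : Prop := ∀ (mileageList : List (String × Int)), Dom_carsDict mileageList → Spec_carsDict mileageList (carsDict mileageList)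

-- ===== LEMMAS AND PROOFS =====

-- A's accumulated value at a key, characterised by the filtered mileages (invariant of A's loop).
theorem carsDict_getD_loop (l : List (String × Int)) (d : PySem.Dict String (Int × Int)) (k : String) :
    (l.foldl (fun cars i =>
        match cars.get? i.1 with
        | none => cars.insert i.1 (1, i.2)
        | some (count, mileage) => cars.insert i.1 (count + 1, mileage + i.2)) d).get? k =
      (let vs := (l.filter (fun p => p.1 == k)).map (·.2)
       match d.get? k with
       | none => if vs.isEmpty then none else some ((vs.length : Int), vs.sum)
       | some (c, s) => some (c + vs.length, s + vs.sum)) := by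
  induction l generalizing d with
  | nil =>
    simp only [List.foldl_nil, List.filter_nil, List.map_nil]
    rcases d.get? k with _ | ⟨c, s⟩ <;> simp
  | cons a l ih =>
    simp only [List.foldl_cons, ih]
    by_cases hk : a.1 = k
    · subst hk
      rcases h : d.get? a.1 with _ | ⟨c, s⟩ <;>
        simp [h, PySem.Dict.get?_insert_self, List.sum_cons] <;> ring_nf <;> simp
    · have hfil : List.filter (fun p => p.1 == k) (a :: l) = List.filter (fun p => p.1 == k) l := by
        simp [List.filter_cons, hk]
      rcases h : d.get? a.1 with _ | ⟨c, s⟩ <;>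
        rcases h2 : d.get? k with _ | ⟨c2, s2⟩ <;>
          simp [h2, PySem.Dict.get?_insert_of_ne _ _ (Ne.symm hk), hfil] <;> rw [hfil]

-- A's loop step written as a single insert (both branches insert at i.1).
theorem carsDict_step_eq :
    (fun (cars : PySem.Dict String (Int × Int)) (i : String × Int) =>
      match cars.get? i.1 with
      | none => cars.insert i.1 (1, i.2)
      | some (count, mileage) => cars.insert i.1 (count + 1, mileage + i.2)) =
    fun (cars : PySem.Dict String (Int × Int)) (i : String × Int) =>
      cars.insert i.1
        (match cars.get? i.1 with
         | none => ((1 : Int), i.2)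
         | some (count, mileage) => (count + 1, mileage + i.2)) := by
  funext cars i
  rcases h : cars.get? i.1 with _ | ⟨c, m⟩ <;> simp [h]

theorem carsDict_spec : Claim_equal_carsDict := by
  intro ml _
  unfold Spec_carsDict carsDict carsDict_alt
  rw [carsDict_step_eq]
  set G : PySem.Dict String (List Int) :=
    ml.foldl (fun d i => d.modify i.1 [] (· ++ [i.2])) PySem.Dict.empty with hG
  set A : PySem.Dict String (Int × Int) :=
    ml.foldl (fun cars i => cars.insert i.1
      (match cars.get? i.1 with
       | none => ((1 : Int), i.2)
       | some (count, mileage) => (count + 1, mileage + i.2))) PySem.Dict.empty with hA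
  have hGnodup : G.keys.Nodup := by
    rw [hG]
    exact PySem.Dict.nodup_keys_foldl_modify_key ml (·.1) [] (fun d i => (· ++ [i.2])) _ (by simp)
  have hAnodup : A.keys.Nodup := by
    rw [hA]
    exact PySem.Dict.nodup_keys_foldl_insert_key ml (·.1) _ _ (by simp)
  have hGkeys : G.keys = PySem.Set.ofList (ml.map (·.1)) := by
    rw [hG, PySem.Dict.keys_foldl_modify_key]
    simp [PySem.Set.update_nil_left]
  have hAkeys : A.keys = PySem.Set.ofList (ml.map (·.1)) := by
    rw [hA, PySem.Dict.keys_foldl_insert_key]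
    simp [PySem.Set.update_nil_left]
  have hGgetD : ∀ k : String, G.getD k [] = (ml.filter (fun p => p.1 == k)).map (·.2) := by
    intro k
    rw [hG, PySem.Dict.getD_foldl_modify_append]
    simp
  -- B's comprehension over fresh distinct keys appends, so its items are a map over G.items
  have hBitems :
      ((G.items.foldl (fun d p => d.insert p.1 ((p.2.length : Int), p.2.sum)) PySem.Dict.empty).items
        : List (String × Int × Int)) =
      G.items.map (fun p => (p.1, ((p.2.length : Int), p.2.sum))) := by
    rw [PySem.Dict.items_foldl_insert_fresh G.items (fun p => p.1)
      (fun p => ((p.2.length : Int), p.2.sum)) PySem.Dict.empty (by simp)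
      (by simpa [PySem.Dict.keys] using hGnodup)]
    simp [PySem.Dict.empty]
  have hGitems : G.items = G.keys.map (fun k => (k, G.getD k [])) :=
    PySem.Dict.items_eq_map_keys G hGnodup []
  have hAitems : A.items = A.keys.map (fun k => (k, A.getD k (0, 0))) :=
    PySem.Dict.items_eq_map_keys A hAnodup (0, 0)
  rw [hBitems, hGitems, hAitems, hAkeys, hGkeys, List.map_map]
  refine List.map_congr_left ?_
  intro k hk
  have hmem : k ∈ ml.map (·.1) := (PySem.Set.mem_ofList _ _).1 hk
  have hvs : (ml.filter (fun p => p.1 == k)).map (·.2) ≠ [] := by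
    rcases List.mem_map.1 hmem with ⟨p, hp, hpk⟩
    have : p ∈ ml.filter (fun p => p.1 == k) := List.mem_filter.2 ⟨hp, by simp [hpk]⟩
    simp only [ne_eq, List.map_eq_nil_iff]
    exact fun h => by simp [h] at this
  have hget : A.get? k = some ((((ml.filter (fun p => p.1 == k)).map (·.2)).length : Int),
      ((ml.filter (fun p => p.1 == k)).map (·.2)).sum) := by
    rw [hA, ← carsDict_step_eq, carsDict_getD_loop]
    simp only [List.isEmpty_iff, PySem.Dict.get?_empty]
    simp only [hvs, if_false]
  simp only [Function.comp_apply]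
  rw [PySem.Dict.getD_eq_get?_getD, hget, hGgetD k]
  simp
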